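-- pv_equiv track=rewrite | github.com/qequ/conway-game-life | src/sum_neighbors.py | sum_neighbors
-- ===== SOURCE A (Python) =====
-- def sum_neighbors(m, i, j, len_x, len_y):
--     pos_x = [0]
--     pos_y = [0]
--
--     if i > 0:
--         pos_x.append(-1)
--     if j > 0:
--         pos_y.append(-1)
--     if i < len_x:
--         pos_x.append(1)
--     if j < len_y:
--         pos_y.append(1)
--
--     sum_neigh = 0
--
--     for x in pos_x:
--         for y in pos_y:
--             if x == 0 and y == 0:
--                 continue
--             sum_neigh += m[i + x][j + y]
--
--     return sum_neigh
-- ===== SOURCE B (Python) =====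
-- def sum_neighbors(m, i, j, len_x, len_y):
--     def strip(r, with_center):
--         row = m[r]
--         s = row[j] if with_center else 0
--         if j > 0:
--             s += row[j - 1]
--         if j < len_y:
--             s += row[j + 1]
--         return s
--
--     s = strip(i, False) if (j > 0 or j < len_y) else 0
--     if i > 0:
--         s += strip(i - 1, True)
--     if i < len_x:
--         s += strip(i + 1, True)
--     return s
-- ===== Notes on version B (the rewrite author's own statement) =====
-- stated objective: simpler
-- what changed: Replaces A's offset-list construction and nested skip-center double loop by a loop-free decomposition: a helper sums one horizontal 3-cell strip via guarded conditional adds, and the result is the center strip (without its center, and only if a side column exists) plus the strips above and below. Pre_ excludes exactly the inputs where A raises IndexError.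
import Mathlib
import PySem

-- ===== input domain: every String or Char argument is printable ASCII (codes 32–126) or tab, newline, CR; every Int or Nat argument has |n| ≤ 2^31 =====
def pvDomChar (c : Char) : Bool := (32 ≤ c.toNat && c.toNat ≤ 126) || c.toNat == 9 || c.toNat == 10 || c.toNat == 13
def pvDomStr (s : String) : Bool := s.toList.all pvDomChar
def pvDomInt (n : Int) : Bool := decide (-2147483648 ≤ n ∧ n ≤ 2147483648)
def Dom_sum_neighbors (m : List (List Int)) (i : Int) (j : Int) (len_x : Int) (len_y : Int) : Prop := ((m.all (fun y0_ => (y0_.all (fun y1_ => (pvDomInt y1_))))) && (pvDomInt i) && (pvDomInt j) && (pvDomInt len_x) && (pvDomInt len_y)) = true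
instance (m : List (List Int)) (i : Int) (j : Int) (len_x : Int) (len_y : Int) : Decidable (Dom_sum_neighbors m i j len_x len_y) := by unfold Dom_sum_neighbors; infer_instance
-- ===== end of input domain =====

-- B replaces A's offset-list building and nested skip-center loop by a loop-free sum of
-- three guarded horizontal strips (objective: simpler decomposition; same cost).

-- ===== PORT A =====
-- m[r][c] with Python semantics (negative index from the end); the getD 0 default is only
-- reached where Python raises IndexError, and Pre_ excludes those inputs
def pvCellA (m : List (List Int)) (r c : Int) : Int :=
  ((PySem.List.pyGet? m r).bind (fun row => PySem.List.pyGet? row c)).getD 0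

def sum_neighbors (m : List (List Int)) (i : Int) (j : Int) (len_x : Int) (len_y : Int) : Int :=
  let pos_x : List Int := [0] ++ (if i > 0 then [-1] else []) ++ (if i < len_x then [1] else [])
  let pos_y : List Int := [0] ++ (if j > 0 then [-1] else []) ++ (if j < len_y then [1] else [])
  pos_x.foldl (fun s x =>
    pos_y.foldl (fun s y =>
      if x = 0 ∧ y = 0 then s else s + pvCellA m (i + x) (j + y)) s) 0

-- ===== PORT B =====
-- one horizontal 3-cell strip of row r: optional center plus the guarded side columns
def pvStrip (m : List (List Int)) (j len_y : Int) (r : Int) (with_center : Bool) : Int :=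
  let row := (PySem.List.pyGet? m r).getD []
  let s := if with_center then (PySem.List.pyGet? row j).getD 0 else 0
  let s := if j > 0 then s + (PySem.List.pyGet? row (j - 1)).getD 0 else s
  if j < len_y then s + (PySem.List.pyGet? row (j + 1)).getD 0 else s

def sum_neighbors_alt (m : List (List Int)) (i : Int) (j : Int) (len_x : Int) (len_y : Int) : Int :=
  let s := if j > 0 ∨ j < len_y then pvStrip m j len_y i false else 0
  let s := if i > 0 then s + pvStrip m j len_y (i - 1) true else s
  if i < len_x then s + pvStrip m j len_y (i + 1) true else s

-- ===== PRECONDITION & SPEC =====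
-- Pre_: every non-center cell of the edge-shrunk window that A reads is Python-indexable;
-- this excludes exactly the inputs on which A raises IndexError.
def Pre_sum_neighbors (m : List (List Int)) (i : Int) (j : Int) (len_x : Int) (len_y : Int) : Prop :=
  ∀ x ∈ (([0] ++ (if i > 0 then [-1] else []) ++ (if i < len_x then [1] else [])) : List Int),
  ∀ y ∈ (([0] ++ (if j > 0 then [-1] else []) ++ (if j < len_y then [1] else [])) : List Int),
  ¬(x = 0 ∧ y = 0) →
  PySem.Raise.InRange m.length (i + x) ∧
    PySem.Raise.InRange ((PySem.List.pyGet? m (i + x)).getD []).length (j + y)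
instance (m : List (List Int)) (i : Int) (j : Int) (len_x : Int) (len_y : Int) : Decidable (Pre_sum_neighbors m i j len_x len_y) := by unfold Pre_sum_neighbors; infer_instance

def pvWitness_sum_neighbors : List (List Int) × Int × Int × Int × Int :=
  ([[1, 2], [3, 4]], 0, 0, 1, 1)

def Spec_sum_neighbors (m : List (List Int)) (i : Int) (j : Int) (len_x : Int) (len_y : Int) (out : Int) : Prop := out = sum_neighbors_alt m i j len_x len_y
instance (m : List (List Int)) (i : Int) (j : Int) (len_x : Int) (len_y : Int) (out : Int) : Decidable (Spec_sum_neighbors m i j len_x len_y out) := by unfold Spec_sum_neighbors; infer_instance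

-- ===== CLAIM (what is proved, stated in full; the proofs are below) =====
def Claim_equal_sum_neighbors : Prop := ∀ (m : List (List Int)) (i : Int) (j : Int) (len_x : Int) (len_y : Int), Dom_sum_neighbors m i j len_x len_y → Pre_sum_neighbors m i j len_x len_y → Spec_sum_neighbors m i j len_x len_y (sum_neighbors m i j len_x len_y)

-- ===== LEMMAS AND PROOFS =====

-- B's row-then-column double lookup equals A's bind-style cell read (both default to 0)
lemma pv_cell (m : List (List Int)) (r c : Int) :
    (PySem.List.pyGet? ((PySem.List.pyGet? m r).getD []) c).getD 0 = pvCellA m r c := by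
  unfold pvCellA
  cases h : PySem.List.pyGet? m r <;>
    simp [PySem.List.pyGet?, PySem.List.pyIdx?]
  rfl

set_option maxHeartbeats 1600000 in
-- the getD-0 totalised ports agree on ALL inputs: both read the same guarded set of cells
lemma pv_main (m : List (List Int)) (i j len_x len_y : Int) :
    sum_neighbors m i j len_x len_y = sum_neighbors_alt m i j len_x len_y := by
  unfold sum_neighbors sum_neighbors_alt pvStrip
  simp only [pv_cell]
  split_ifs <;>
    first
      | (exfalso; first | assumption | omega)
      | (simp [List.foldl]; try ring)

-- ===== VERDICT (by name: the statement is the Claim_ definition above) =====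
theorem sum_neighbors_spec : Claim_equal_sum_neighbors := by
  intro m i j len_x len_y _ _
  exact pv_main m i j len_x len_y
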